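-- pv_equiv track=rewrite | github.com/schardosin/juicytrade | trade_backend/services/data_aggregation/price_query_service.py | _group_symbols_by_underlying
-- ===== SOURCE A (Python) =====
-- from typing import Optional, List, Dict, Any, Tuple
--
-- def _group_symbols_by_underlying(symbols: List[str]) -> Dict[str, List[str]]:
--     """
--     Group symbols by their underlying asset for efficient batch queries.
--
--     Args:
--         symbols: List of symbols to group
--
--     Returns:
--         Dictionary mapping underlying symbol to list of option symbols
--     """
--     groups = {}
--
--     for symbol in symbols:
--         # Extract underlying from option symbol (e.g., "SPY   250812C00643000" -> "SPY")
--         underlying = symbol.split()[0] if ' ' in symbol else symbol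
--
--         if underlying not in groups:
--             groups[underlying] = []
--         groups[underlying].append(symbol)
--
--     return groups
-- ===== SOURCE B (Python) =====
-- from typing import Optional, List, Dict, Any, Tuple
--
-- def _group_symbols_by_underlying(symbols: List[str]) -> Dict[str, List[str]]:
--     def _underlying(symbol: str) -> str:
--         return symbol.split()[0] if ' ' in symbol else symbol
--
--     keys = [_underlying(symbol) for symbol in symbols]
--     return {
--         underlying: [s for s, k in zip(symbols, keys) if k == underlying]
--         for underlying in dict.fromkeys(keys)
--     }
-- ===== Notes on version B (the rewrite author's own statement) =====
-- stated objective: alternative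
-- what changed: Replaces A's single mutating-dict bucketing loop by a two-phase declarative build: precompute each symbol's underlying key once, then a dict comprehension over the deduplicated keys (first-occurrence order) that selects each group by filtering the symbol list.
import Mathlib
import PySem

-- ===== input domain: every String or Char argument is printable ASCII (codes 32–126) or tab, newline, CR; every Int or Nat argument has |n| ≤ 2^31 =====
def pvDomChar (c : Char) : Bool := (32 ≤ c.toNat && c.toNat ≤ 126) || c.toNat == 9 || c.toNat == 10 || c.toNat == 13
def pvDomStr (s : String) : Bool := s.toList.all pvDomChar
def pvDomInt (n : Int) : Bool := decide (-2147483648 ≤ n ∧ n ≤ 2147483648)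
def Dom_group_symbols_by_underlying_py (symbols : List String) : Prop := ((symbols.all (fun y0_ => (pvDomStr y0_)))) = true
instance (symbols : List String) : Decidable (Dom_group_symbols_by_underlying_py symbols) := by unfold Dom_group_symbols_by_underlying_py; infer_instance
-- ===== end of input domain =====

-- B replaces A's single mutating-dict bucketing loop by a two-phase build: compute every
-- symbol's key first, then one group-selecting filter per distinct key (objective: alternative).

-- ===== PORT A =====
-- underlying = symbol.split()[0] if ' ' in symbol else symbol   (none = IndexError)
def pvUnderlyingA (symbol : String) : Option String :=
  if PySem.Str.isIn " " symbol then PySem.List.pyGet? (PySem.Str.split₀ symbol) 0 else some symbol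

-- one iteration of A's for-loop (the state is none once the Python has raised)
def pvStepA (st : Option (PySem.Dict String (List String))) (symbol : String) :
    Option (PySem.Dict String (List String)) :=
  match st, pvUnderlyingA symbol with
  | some groups, some underlying =>
      some (PySem.Dict.modify
              (if groups.contains underlying then groups
               else groups.insert underlying [])
              underlying [] (fun l => l ++ [symbol]))
  | _, _ => none

def group_symbols_by_underlying_py (symbols : List String) : List (String × List String) :=
  match symbols.foldl pvStepA (some PySem.Dict.empty) with
  | some groups => groups.items
  | none => []

-- ===== PORT B =====
def pvUnderlyingB (symbol : String) : Option String :=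
  if PySem.Str.isIn " " symbol then PySem.List.pyGet? (PySem.Str.split₀ symbol) 0 else some symbol

def group_symbols_by_underlying_py_alt (symbols : List String) : List (String × List String) :=
  match symbols.mapM pvUnderlyingB with
  | none => []
  | some keys =>
      (PySem.List.dedup keys).map
        (fun underlying =>
          (underlying,
           ((symbols.zip keys).filter (fun p => p.2 == underlying)).map Prod.fst))

-- ===== PRECONDITION & SPEC =====
-- Pre_ excludes exactly the inputs where the Python raises IndexError: a symbol that
-- contains a space yet splits into no words (an all-whitespace symbol), so split()[0] fails.
def Pre_group_symbols_by_underlying_py (symbols : List String) : Prop :=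
  ∀ s ∈ symbols, PySem.Str.isIn " " s = true → PySem.Str.split₀ s ≠ []
instance (symbols : List String) : Decidable (Pre_group_symbols_by_underlying_py symbols) := by
  unfold Pre_group_symbols_by_underlying_py; infer_instance

def pvWitness_group_symbols_by_underlying_py : List String :=
  ["SPY   250812C00643000", "AAPL", "SPY", "SPY   250812P00640000"]

def Spec_group_symbols_by_underlying_py (symbols : List String) (out : List (String × List String)) : Prop := out = group_symbols_by_underlying_py_alt symbols
instance (symbols : List String) (out : List (String × List String)) : Decidable (Spec_group_symbols_by_underlying_py symbols out) := by unfold Spec_group_symbols_by_underlying_py; infer_instance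

-- ===== CLAIM (what is proved, stated in full; the proofs are below) =====
def Claim_equal_group_symbols_by_underlying_py : Prop := ∀ (symbols : List String), Dom_group_symbols_by_underlying_py symbols → Pre_group_symbols_by_underlying_py symbols → Spec_group_symbols_by_underlying_py symbols (group_symbols_by_underlying_py symbols)

-- ===== LEMMAS AND PROOFS =====

-- the grouping both programs compute, as a function of the (symbol, key) pairs
def pvBuckets (pairs : List (String × String)) : List (String × List String) :=
  (PySem.Set.ofList (pairs.map Prod.snd)).map
    (fun u => (u, (pairs.filter (fun p => p.2 == u)).map Prod.fst))

theorem pvAny_beq (K : List String) (u : String) : (K.any fun x => x == u) = decide (u ∈ K) := by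
  induction K with
  | nil => simp
  | cons a K ih =>
      by_cases hau : a = u
      · simp [hau]
      · simp [List.any_cons, ih, hau, Ne.symm hau]

theorem pvContains_map (K : List String) (h : String → List String) (u : String) :
    PySem.Dict.contains ⟨K.map (fun v => (v, h v))⟩ u = decide (u ∈ K) := by
  simp only [PySem.Dict.contains, List.any_map, Function.comp_def]
  exact pvAny_beq K u

theorem pvGetD_map (K : List String) (h : String → List String) (u : String) (d : List String) :
    PySem.Dict.getD ⟨K.map (fun v => (v, h v))⟩ u d = if u ∈ K then h u else d := by
  induction K with
  | nil => simp [PySem.Dict.getD, PySem.Dict.get?]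
  | cons a K ih =>
      simp only [PySem.Dict.getD, PySem.Dict.get?] at ih ⊢
      by_cases hu : u = a
      · subst hu; simp
      · rw [List.map_cons, List.find?_cons_of_neg (by simp [Ne.symm hu])]
        simp only [ih]
        simp [hu]

-- one iteration of A's loop, described on pvBuckets
theorem pvBuckets_snoc (pairs : List (String × String)) (s u : String) :
    pvBuckets (pairs ++ [(s, u)]) =
      (PySem.Dict.modify
        (if PySem.Dict.contains (⟨pvBuckets pairs⟩ : PySem.Dict String (List String)) u then
           (⟨pvBuckets pairs⟩ : PySem.Dict String (List String))
         else PySem.Dict.insert (⟨pvBuckets pairs⟩ : PySem.Dict String (List String)) u [])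
        u [] (fun l => l ++ [s])).items := by
  have hK : PySem.Set.ofList ((pairs ++ [(s, u)]).map Prod.snd)
      = if u ∈ PySem.Set.ofList (pairs.map Prod.snd)
        then PySem.Set.ofList (pairs.map Prod.snd)
        else PySem.Set.ofList (pairs.map Prod.snd) ++ [u] := by
    rw [List.map_append, PySem.Set.ofList_eq_foldl, List.foldl_append,
        ← PySem.Set.ofList_eq_foldl]
    simp [PySem.Set.add_eq_ite]
  set K := PySem.Set.ofList (pairs.map Prod.snd) with hKdef
  set h : String → List String := fun u' => (pairs.filter (fun p => p.2 == u')).map Prod.fst with hdef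
  have hL : pvBuckets pairs = K.map (fun v => (v, h v)) := rfl
  by_cases hmem : u ∈ K
  · -- existing key: modify replaces the bucket in place
    rw [hL, pvContains_map, if_pos (by simp [hmem])]
    rw [PySem.Dict.modify]
    rw [show (PySem.Dict.getD (⟨K.map (fun v => (v, h v))⟩ : PySem.Dict String (List String)) u []) = h u from by
      rw [pvGetD_map]; simp [hmem]]
    rw [PySem.Dict.insert, if_pos (by rw [pvContains_map]; simp [hmem])]
    unfold pvBuckets
    rw [hK, if_pos hmem]
    simp only [List.map_map]
    apply List.map_congr_left
    intro v hv
    by_cases hvu : v = u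
    · subst hvu; simp [hdef]
    · simp [hdef, Ne.symm hvu, hvu]
  · -- new key: insert appends an empty bucket, modify fills it
    have hnotin : u ∉ pairs.map Prod.snd := fun hc => hmem (by
      rw [hKdef]; exact (PySem.Set.mem_ofList _ _).mpr hc)
    have hfilnil : pairs.filter (fun p => p.2 == u) = [] := by
      rw [List.filter_eq_nil_iff]
      intro p hp hb
      exact hnotin (List.mem_map.mpr ⟨p, hp, beq_iff_eq.mp hb⟩)
    rw [hL, pvContains_map, if_neg (by simp [hmem])]
    have hins : (PySem.Dict.insert (⟨K.map (fun v => (v, h v))⟩ : PySem.Dict String (List String)) u [])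
        = ⟨(K ++ [u]).map (fun v => (v, if v = u then [] else h v))⟩ := by
      rw [PySem.Dict.insert, if_neg (by rw [pvContains_map]; simp [hmem])]
      simp only [List.map_append, List.map_cons, List.map_nil]
      have h1 : K.map (fun v => (v, h v)) = K.map (fun v => (v, if v = u then [] else h v)) :=
        List.map_congr_left (fun v hv => by
          have : ¬ v = u := fun hc => hmem (hc ▸ hv)
          simp [this])
      simp [h1]
    rw [hins, PySem.Dict.modify]
    rw [show PySem.Dict.getD (⟨(K ++ [u]).map (fun v => (v, if v = u then [] else h v))⟩ : PySem.Dict String (List String)) u []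
        = [] from by rw [pvGetD_map]; simp]
    rw [PySem.Dict.insert, if_pos (by rw [pvContains_map]; simp)]
    unfold pvBuckets
    rw [hK, if_neg hmem]
    simp only [List.map_map]
    apply List.map_congr_left
    intro v hv
    by_cases hvu : v = u
    · subst hvu; simp [hdef, hfilnil]
    · simp [hdef, Ne.symm hvu, hvu]

-- A's whole loop, described on pvBuckets
theorem pvFoldA_spec (syms : List String) : ∀ pairs : List (String × String),
    (∀ s ∈ syms, ∃ u, pvUnderlyingA s = some u) →
    syms.foldl pvStepA (some ⟨pvBuckets pairs⟩)
      = some ⟨pvBuckets (pairs ++ syms.map (fun s => (s, (pvUnderlyingA s).getD "")))⟩ := by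
  induction syms with
  | nil => intro pairs _; simp
  | cons s syms ih =>
      intro pairs hall
      obtain ⟨u, hu⟩ := hall s (by simp)
      have hstep : pvStepA (some ⟨pvBuckets pairs⟩) s = some ⟨pvBuckets (pairs ++ [(s, u)])⟩ := by
        simp [pvStepA, hu, pvBuckets_snoc]
      simp only [List.foldl_cons, hstep]
      rw [ih (pairs ++ [(s, u)]) (fun t ht => hall t (by simp [ht]))]
      simp [hu]

theorem pvMapM_eq (und : String → Option String) (syms : List String)
    (h : ∀ s ∈ syms, ∃ u, und s = some u) :
    syms.mapM und = some (syms.map (fun s => (und s).getD "")) := by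
  induction syms with
  | nil => rfl
  | cons s syms ih =>
      obtain ⟨u, hu⟩ := h s (by simp)
      simp [List.mapM_cons, hu, ih (fun t ht => h t (by simp [ht]))]

theorem pvZipMap (xs : List String) (f : String → String) :
    xs.zip (xs.map f) = xs.map (fun x => (x, f x)) := by
  calc xs.zip (xs.map f) = (xs.map id).zip (xs.map f) := by rw [List.map_id]
    _ = xs.map (fun x => (id x, f x)) := List.zip_map'
    _ = xs.map (fun x => (x, f x)) := rfl

-- ===== VERDICT (by name: the statement is the Claim_ definition above) =====
theorem group_symbols_by_underlying_py_spec : Claim_equal_group_symbols_by_underlying_py := by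
  intro symbols _ hpre
  have hall : ∀ s ∈ symbols, ∃ u, pvUnderlyingA s = some u := by
    intro s hs
    unfold pvUnderlyingA
    by_cases hin : PySem.Str.isIn " " s = true
    · rw [if_pos hin]
      cases hsp : PySem.Str.split₀ s with
      | nil => exact absurd hsp (hpre s hs hin)
      | cons w ws => exact ⟨w, by simp [PySem.List.pyGet?, PySem.List.pyIdx?]⟩
    · rw [if_neg hin]; exact ⟨s, rfl⟩
  unfold Spec_group_symbols_by_underlying_py
  unfold group_symbols_by_underlying_py group_symbols_by_underlying_py_alt
  have hB : symbols.mapM pvUnderlyingB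
      = some (symbols.map (fun s => (pvUnderlyingA s).getD "")) :=
    pvMapM_eq pvUnderlyingB symbols hall
  have hA := pvFoldA_spec symbols [] hall
  simp only [List.nil_append] at hA
  rw [show (PySem.Dict.empty : PySem.Dict String (List String)) = ⟨pvBuckets []⟩ from rfl,
      hA, hB]
  simp only [PySem.List.dedup_eq_ofList]
  rw [pvZipMap symbols (fun s => (pvUnderlyingA s).getD "")]
  unfold pvBuckets
  simp [List.map_map, Function.comp_def]
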